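-- pv_equiv track=rewrite | github.com/dcferreira/nonce2vec | nonce2vec/models/nonce2vec.py | _get_unique_ctx_ent_tuples
-- ===== SOURCE A (Python) =====
-- from collections import defaultdict, OrderedDict
--
-- def _get_unique_ctx_ent_tuples(ctx_ent_tuples):
--     ctx_ent_dict = OrderedDict()
--     for ctx, ent in ctx_ent_tuples:
--         if ctx not in ctx_ent_dict:
--             ctx_ent_dict[ctx] = ent
--         else:
--             ctx_ent_dict[ctx] = max(ent, ctx_ent_dict[ctx])
--     return [(ctx, ent) for ctx, ent in ctx_ent_dict.items()]
-- ===== SOURCE B (Python) =====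
-- def _get_unique_ctx_ent_tuples(ctx_ent_tuples):
--     pairs = list(ctx_ent_tuples)
--     ctxs = [ctx for ctx, _ in pairs]
--     return [(ctx, max(e for c, e in pairs if c == ctx))
--             for i, (ctx, _) in enumerate(pairs) if ctx not in ctxs[:i]]
-- ===== Notes on version B (the rewrite author's own statement) =====
-- stated objective: simpler
-- what changed: Replaces A's stateful ordered-dict loop (insert-or-max, then dump items) by a stateless brute-force comprehension: keep position i iff its ctx does not occur in ctxs[:i], and recompute that ctx's max entropy with a full scan of the pairs; no dict and no mutable state, at the cost of quadratic scans.
import Mathlib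
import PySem

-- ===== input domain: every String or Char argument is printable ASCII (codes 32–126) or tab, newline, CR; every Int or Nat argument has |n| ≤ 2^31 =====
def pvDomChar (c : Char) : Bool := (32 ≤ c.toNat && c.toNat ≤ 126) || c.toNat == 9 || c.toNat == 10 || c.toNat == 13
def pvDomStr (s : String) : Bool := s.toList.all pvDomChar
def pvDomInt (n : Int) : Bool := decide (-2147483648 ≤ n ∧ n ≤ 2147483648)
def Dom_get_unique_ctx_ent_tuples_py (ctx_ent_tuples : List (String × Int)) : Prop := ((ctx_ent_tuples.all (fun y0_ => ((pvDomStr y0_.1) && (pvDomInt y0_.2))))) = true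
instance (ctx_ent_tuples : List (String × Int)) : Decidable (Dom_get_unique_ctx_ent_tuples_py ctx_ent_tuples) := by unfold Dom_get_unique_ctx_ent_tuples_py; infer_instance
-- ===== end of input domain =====

-- B replaces A's stateful ordered-dict aggregation loop by a stateless brute-force
-- comprehension (keep position i iff its ctx is not in ctxs[:i]; recompute each kept
-- ctx's max by a full scan): simpler/declarative but O(n^2) instead of A's O(n).

-- ===== PORT A =====
-- fused loop: insert-or-max into an insertion-ordered dict, then dump its items
def get_unique_ctx_ent_tuples_py (ctx_ent_tuples : List (String × Int)) : List (String × Int) :=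
  let ctx_ent_dict : PySem.Dict String Int :=
    ctx_ent_tuples.foldl (fun d p =>
      match d.get? p.1 with          -- 'if ctx not in ctx_ent_dict' / else read ctx_ent_dict[ctx]
      | none   => d.insert p.1 p.2
      | some v => d.insert p.1 (max p.2 v)) PySem.Dict.empty
  ctx_ent_dict.items

-- ===== PORT B =====
-- comprehension: keep (i, ctx) iff ctx ∉ ctxs[:i]; value = max over a full scan of pairs
def get_unique_ctx_ent_tuples_py_alt (ctx_ent_tuples : List (String × Int)) : List (String × Int) :=
  let pairs := ctx_ent_tuples
  let ctxs := pairs.map (fun p => p.1)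
  ((PySem.List.enumerate pairs).filter
      (fun ip => !((PySem.List.slice ctxs none (some ip.1)).contains ip.2.1))).map
    (fun ip => (ip.2.1,
      -- Python's max(generator) raises only on empty; here ip's own pair always matches,
      -- so the list is nonempty and the .getD 0 default is never used
      (PySem.List.max? ((pairs.filter (fun q => q.1 == ip.2.1)).map (fun q => q.2))
        (fun e => e)).getD 0))

-- ===== PRECONDITION & SPEC =====
def Spec_get_unique_ctx_ent_tuples_py (ctx_ent_tuples : List (String × Int)) (out : List (String × Int)) : Prop := out = get_unique_ctx_ent_tuples_py_alt ctx_ent_tuples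
instance (ctx_ent_tuples : List (String × Int)) (out : List (String × Int)) : Decidable (Spec_get_unique_ctx_ent_tuples_py ctx_ent_tuples out) := by unfold Spec_get_unique_ctx_ent_tuples_py; infer_instance

-- ===== CLAIM (what is proved, stated in full; the proofs are below) =====
def Claim_equal_get_unique_ctx_ent_tuples_py : Prop := ∀ (ctx_ent_tuples : List (String × Int)), Dom_get_unique_ctx_ent_tuples_py ctx_ent_tuples → Spec_get_unique_ctx_ent_tuples_py ctx_ent_tuples (get_unique_ctx_ent_tuples_py ctx_ent_tuples)

-- ===== LEMMAS AND PROOFS =====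

-- A's step written in 'insert (key x) (f d x)' shape (for the keys lemmas)
theorem stepA_insert_shape (d : PySem.Dict String Int) (p : String × Int) :
    (match d.get? p.1 with
     | none   => d.insert p.1 p.2
     | some v => d.insert p.1 (max p.2 v))
    = d.insert p.1 (match d.get? p.1 with | none => p.2 | some v => max p.2 v) := by
  rcases d.get? p.1 with _ | v <;> rfl

-- first-seen fresh keys relative to an already-seen list
def freshKeys (seen : List String) : List String → List String
  | [] => []
  | c :: t => if c ∈ seen then freshKeys seen t else c :: freshKeys (seen ++ [c]) t

theorem mem_of_mem_freshKeys (l : List String) :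
    ∀ (seen : List String) (c : String), c ∈ freshKeys seen l → c ∈ l := by
  induction l with
  | nil => intro seen c h; simp [freshKeys] at h
  | cons x t ih =>
    intro seen c h
    by_cases hx : x ∈ seen
    · simp only [freshKeys, if_pos hx] at h
      exact List.mem_cons_of_mem x (ih seen c h)
    · simp only [freshKeys, if_neg hx, List.mem_cons] at h
      rcases h with h | h
      · exact h ▸ List.mem_cons_self
      · exact List.mem_cons_of_mem x (ih (seen ++ [x]) c h)

theorem set_update_eq_append_freshKeys (l : List String) :
    ∀ (seen : PySem.Set String), PySem.Set.update seen l = seen ++ freshKeys seen l := by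
  induction l with
  | nil => intro seen; simp [PySem.Set.update, freshKeys]
  | cons c t ih =>
    intro seen
    by_cases hc : c ∈ seen
    · simp only [PySem.Set.update, List.foldl_cons, PySem.Set.add_of_mem hc, freshKeys, if_pos hc]
      exact ih seen
    · simp only [PySem.Set.update, List.foldl_cons, PySem.Set.add_of_not_mem hc, freshKeys,
        if_neg hc]
      rw [show (List.foldl PySem.Set.add (seen ++ [c]) t) = PySem.Set.update (seen ++ [c]) t from rfl,
        ih (seen ++ [c])]
      simp

-- A's aggregation fold, characterised per key: the running value is the max of the
-- entropies filed under that key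
theorem foldA_get? (xs : List (String × Int)) :
    ∀ (d : PySem.Dict String Int) (c : String),
    (xs.foldl (fun d p =>
        match d.get? p.1 with
        | none   => d.insert p.1 p.2
        | some v => d.insert p.1 (max p.2 v)) d).get? c
    = match d.get? c, (xs.filter (fun q => q.1 == c)).map (fun q => q.2) with
      | some v, es => some (es.foldl max v)
      | none, [] => none
      | none, x :: t => some (t.foldl max x) := by
  induction xs with
  | nil =>
    intro d c
    rcases hd : d.get? c with _ | v <;> simp [hd]
  | cons p t ih =>
    intro d c
    rw [List.foldl_cons, stepA_insert_shape, ih]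
    by_cases hpc : p.1 = c
    · subst hpc
      rw [PySem.Dict.get?_insert_self]
      simp only [List.filter_cons, beq_self_eq_true, if_pos, List.map_cons]
      rcases hd : d.get? p.1 with _ | v
      · simp
      · simp [List.foldl_cons, max_comm]
    · have hne : c ≠ p.1 := fun h => hpc h.symm
      rw [PySem.Dict.get?_insert_of_ne _ _ hne]
      have : ((p.1 : String) == c) = false := by simp [hpc]
      simp only [List.filter_cons, this, Bool.false_eq_true, if_false]

-- B's comprehension (first-occurrence filter over enumerate + slice) emits exactly the
-- fresh keys, each mapped through g
theorem filter_enumerate_eq_freshKeys (g : String → Int) :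
    ∀ (ys : List (String × Int)) (P seen : List String), (∀ x, x ∈ P ↔ x ∈ seen) →
    ((PySem.List.enumerate ys (P.length : Int)).filter
        (fun ip => !((PySem.List.slice (P ++ ys.map (fun p => p.1)) none (some ip.1)).contains ip.2.1))).map
      (fun ip => (ip.2.1, g ip.2.1))
    = (freshKeys seen (ys.map (fun p => p.1))).map (fun c => (c, g c)) := by
  intro ys
  induction ys with
  | nil => intro P seen h; simp [PySem.List.enumerate_nil, freshKeys]
  | cons p t ih =>
    intro P seen h
    rw [PySem.List.enumerate_cons]
    have hslice : PySem.List.slice (P ++ (p :: t).map (fun p => p.1)) none (some (P.length : Int))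
        = P := by
      rw [PySem.List.slice_to_natCast, List.take_left]
    have hlist : P ++ (p :: t).map (fun p => p.1) = (P ++ [p.1]) ++ t.map (fun p => p.1) := by
      simp
    have hlen : (P.length : Int) + 1 = (((P ++ [p.1]).length : Nat) : Int) := by
      simp [List.length_append]
    by_cases hm : p.1 ∈ P
    · have hcond : (!((PySem.List.slice (P ++ (p :: t).map (fun p => p.1)) none
          (some (P.length : Int))).contains p.1)) = false := by
        rw [hslice]; simp [hm]
      rw [List.filter_cons_of_neg (by simpa using hcond)]
      rw [hlist, hlen, ih (P ++ [p.1]) seen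
        (fun x => by
          simp only [List.mem_append, List.mem_singleton]
          constructor
          · rintro (hx | rfl)
            · exact (h x).1 hx
            · exact (h p.1).1 hm
          · intro hx; exact Or.inl ((h x).2 hx))]
      have : p.1 ∈ seen := (h p.1).1 hm
      simp [freshKeys, this]
    · have hcond : (!((PySem.List.slice (P ++ (p :: t).map (fun p => p.1)) none
          (some (P.length : Int))).contains p.1)) = true := by
        rw [hslice]; simp [hm]
      rw [List.filter_cons_of_pos (by simpa using hcond)]
      rw [List.map_cons, hlist, hlen, ih (P ++ [p.1]) (seen ++ [p.1])
        (fun x => by simp [h])]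
      have : p.1 ∉ seen := fun hx => hm ((h p.1).2 hx)
      simp [freshKeys, this]

-- ===== VERDICT (by name: the statement is the Claim_ definition above) =====
theorem get_unique_ctx_ent_tuples_py_spec : Claim_equal_get_unique_ctx_ent_tuples_py := by
  intro xs _
  show get_unique_ctx_ent_tuples_py xs = get_unique_ctx_ent_tuples_py_alt xs
  unfold get_unique_ctx_ent_tuples_py get_unique_ctx_ent_tuples_py_alt
  simp only []
  set dA := xs.foldl (fun d p =>
      match d.get? p.1 with
      | none   => d.insert p.1 p.2
      | some v => d.insert p.1 (max p.2 v)) PySem.Dict.empty with hdA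
  have hshape : dA = xs.foldl (fun d p =>
      d.insert p.1 (match d.get? p.1 with | none => p.2 | some v => max p.2 v))
      PySem.Dict.empty := by
    rw [hdA]; congr 1; funext d p; exact stepA_insert_shape d p
  have hkeys : dA.keys = freshKeys [] (xs.map (fun p => p.1)) := by
    rw [hshape, PySem.Dict.keys_foldl_insert_key xs (fun p => p.1) _ PySem.Dict.empty]
    have : (PySem.Dict.empty : PySem.Dict String Int).keys = ([] : PySem.Set String) := rfl
    rw [this, set_update_eq_append_freshKeys]
    simp
  have hnodup : dA.keys.Nodup := by
    rw [hshape]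
    exact PySem.Dict.nodup_keys_foldl_insert_key xs (fun p => p.1) _ PySem.Dict.empty
      (by simp [PySem.Dict.keys, PySem.Dict.empty])
  -- B's side: collapse the comprehension to a map over the fresh keys
  have hB : ((PySem.List.enumerate xs (0 : Int)).filter
      (fun ip => !((PySem.List.slice (xs.map (fun p => p.1)) none (some ip.1)).contains ip.2.1))).map
      (fun ip => (ip.2.1,
        (PySem.List.max? ((xs.filter (fun q => q.1 == ip.2.1)).map (fun q => q.2))
          (fun e => e)).getD 0))
      = (freshKeys [] (xs.map (fun p => p.1))).map (fun c => (c,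
          (PySem.List.max? ((xs.filter (fun q => q.1 == c)).map (fun q => q.2))
            (fun e => e)).getD 0)) := by
    have := filter_enumerate_eq_freshKeys
      (fun c => (PySem.List.max? ((xs.filter (fun q => q.1 == c)).map (fun q => q.2))
          (fun e => e)).getD 0) xs [] [] (by simp)
    simpa using this
  rw [PySem.Dict.items_eq_map_keys dA hnodup 0, hkeys, hB]
  refine List.map_congr_left (fun c hc => ?_)
  -- c really occurs in xs, so the scan list is nonempty
  have hcxs : c ∈ xs.map (fun p => p.1) := mem_of_mem_freshKeys _ [] c hc
  obtain ⟨p, hp, hpc⟩ := List.mem_map.1 hcxs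
  have hmemf : p ∈ xs.filter (fun q => q.1 == c) :=
    List.mem_filter.2 ⟨hp, by simp [hpc]⟩
  have hne : (xs.filter (fun q => q.1 == c)).map (fun q => q.2) ≠ [] := by
    intro h0
    rw [List.map_eq_nil_iff.1 h0] at hmemf
    simp at hmemf
  rcases hrest : (xs.filter (fun q => q.1 == c)).map (fun q => q.2) with _ | ⟨x, t⟩
  · exact absurd hrest hne
  · have hget : dA.get? c = some (t.foldl max x) := by
      rw [hdA, foldA_get? xs PySem.Dict.empty c]
      simp [hrest, PySem.Dict.get?_empty]
    have : dA.getD c 0 = t.foldl max x := by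
      simp [PySem.Dict.getD, hget]
    rw [this, hrest, PySem.List.max?_id_cons]
    rfl
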